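-- pv_equiv track=rewrite | github.com/camjoe/trading_strategies | scripts/check_docs_freshness.py | is_documentation_path
-- ===== SOURCE A (Python) =====
-- from typing import Any
--
-- def normalize_path(value: str) -> str:
--     return str(value or "").replace("\\", "/").strip().strip("/").lower()
--
-- def is_documentation_path(path_value: str, docs_config: dict[str, Any]) -> bool:
--     normalized = normalize_path(path_value)
--     if not normalized:
--         return False
--     if normalized.endswith("/readme.md") or normalized == "readme.md":
--         return True
--     for directory in docs_config.get("documentationDirectories") or []:
--         if normalized == directory or normalized.startswith(directory + "/"):
--             return True
--     return False
-- ===== SOURCE B (Python) =====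
-- def normalize_path(value: str) -> str:
--     return str(value or "").replace("\\", "/").strip().strip("/").lower()
--
-- def is_documentation_path(path_value: str, docs_config: dict) -> bool:
--     normalized = normalize_path(path_value)
--     if not normalized:
--         return False
--     if normalized.endswith("/readme.md") or normalized == "readme.md":
--         return True
--     dirs = set(docs_config.get("documentationDirectories") or [])
--     prefix = ""
--     for ch in normalized:
--         if ch == "/" and prefix in dirs:
--             return True
--         prefix += ch
--     return normalized in dirs
-- ===== Notes on version B (the rewrite author's own statement) =====
-- stated objective: alternative
-- what changed: Instead of scanning every configured directory and testing normalized == d or normalized.startswith(d + '/'), B puts the directories in a set once and makes a single pass over the normalized path, set-checking the prefix that ends at each '/' boundary plus the whole path.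
import Mathlib
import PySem

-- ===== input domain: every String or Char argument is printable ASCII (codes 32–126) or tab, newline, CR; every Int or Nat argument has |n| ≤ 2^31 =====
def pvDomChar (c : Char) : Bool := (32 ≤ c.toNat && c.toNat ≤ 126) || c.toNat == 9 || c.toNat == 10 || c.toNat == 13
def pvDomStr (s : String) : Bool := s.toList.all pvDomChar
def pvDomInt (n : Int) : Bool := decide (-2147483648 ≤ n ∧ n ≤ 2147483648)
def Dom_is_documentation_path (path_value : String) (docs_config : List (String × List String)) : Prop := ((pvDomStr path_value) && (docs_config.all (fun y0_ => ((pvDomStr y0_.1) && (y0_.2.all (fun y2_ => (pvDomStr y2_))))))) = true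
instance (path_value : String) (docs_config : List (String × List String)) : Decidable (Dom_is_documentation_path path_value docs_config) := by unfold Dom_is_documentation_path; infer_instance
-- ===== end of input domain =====

-- B replaces A's scan over every configured directory (building directory + "/" and calling
-- startswith each time) by one left-to-right walk over the normalized path that set-checks the
-- prefix ending at each '/' boundary (objective: alternative/simpler per-path traversal).

-- ===== PORT A =====
-- shared helper: normalize_path (used verbatim by both Pythons)
def normalize_path (value : String) : String :=
  PySem.Str.lower (PySem.Str.stripChars (PySem.Str.strip (PySem.Str.replace value "\\" "/")) "/")

def is_documentation_path (path_value : String) (docs_config : List (String × List String)) : Bool :=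
  let normalized := normalize_path path_value
  if normalized == "" then false
  else if PySem.Str.endswith normalized "/readme.md" || normalized == "readme.md" then true
  else
    ((PySem.Dict.get? (PySem.Dict.mk docs_config) "documentationDirectories").getD []).any
      (fun directory => normalized == directory || PySem.Str.startswith normalized (directory ++ "/"))

-- ===== PORT B =====
-- the 'for ch in normalized' loop of Source B, carrying the prefix built so far
def docPrefixScan (dirs : PySem.Set (List Char)) : List Char → List Char → Bool
  | _, [] => false
  | pre, c :: rest =>
      if c == '/' && PySem.Set.contains dirs pre then true
      else docPrefixScan dirs (pre ++ [c]) rest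

def is_documentation_path_alt (path_value : String) (docs_config : List (String × List String)) : Bool :=
  let normalized := normalize_path path_value
  if normalized == "" then false
  else if PySem.Str.endswith normalized "/readme.md" || normalized == "readme.md" then true
  else
    let dirs : PySem.Set (List Char) :=
      PySem.Set.ofList (((PySem.Dict.get? (PySem.Dict.mk docs_config) "documentationDirectories").getD []).map String.toList)
    if docPrefixScan dirs [] normalized.toList then true
    else PySem.Set.contains dirs normalized.toList

-- ===== PRECONDITION & SPEC =====
def Spec_is_documentation_path (path_value : String) (docs_config : List (String × List String)) (out : Bool) : Prop := out = is_documentation_path_alt path_value docs_config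
instance (path_value : String) (docs_config : List (String × List String)) (out : Bool) : Decidable (Spec_is_documentation_path path_value docs_config out) := by unfold Spec_is_documentation_path; infer_instance

-- ===== CLAIM (what is proved, stated in full; the proofs are below) =====
def Claim_equal_is_documentation_path : Prop := ∀ (path_value : String) (docs_config : List (String × List String)), Dom_is_documentation_path path_value docs_config → Spec_is_documentation_path path_value docs_config (is_documentation_path path_value docs_config)

-- ===== LEMMAS AND PROOFS =====

-- what the B-side scan finds: a set member that is the part of pre ++ rest before some '/' in rest
theorem docPrefixScan_eq_true_iff (dirs : PySem.Set (List Char)) :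
    ∀ (rest pre : List Char),
      docPrefixScan dirs pre rest = true ↔
        ∃ ds ∈ dirs, ∃ t : List Char, pre ++ rest = ds ++ '/' :: t ∧ pre.length ≤ ds.length := by
  intro rest
  induction rest with
  | nil =>
    intro pre
    simp only [docPrefixScan, List.append_nil, Bool.false_eq_true, false_iff]
    rintro ⟨ds, _, t, heq, hle⟩
    have := congrArg List.length heq
    simp at this
    omega
  | cons c rest ih =>
    intro pre
    simp only [docPrefixScan]
    by_cases hhit : (c == '/' && PySem.Set.contains dirs pre) = true
    · simp only [if_pos hhit, true_iff]
      obtain ⟨hc, hmem⟩ := Bool.and_eq_true_iff.mp hhit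
      refine ⟨pre, (PySem.Set.contains_iff _ _).mp hmem, rest, ?_, le_refl _⟩
      simp [beq_iff_eq.mp hc]
    · simp only [if_neg hhit, ih]
      constructor
      · rintro ⟨ds, hds, t, heq, hle⟩
        refine ⟨ds, hds, t, ?_, ?_⟩
        · simpa using heq
        · simp at hle; omega
      · rintro ⟨ds, hds, t, heq, hle⟩
        rcases Nat.lt_or_ge pre.length ds.length with hlt | hge
        · refine ⟨ds, hds, t, ?_, ?_⟩
          · simpa using heq
          · simp; omega
        · -- then pre = ds, c = '/' and pre is in the set: the if-branch would have fired
          exfalso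
          have hlen : pre.length = ds.length := le_antisymm hle hge
          have hpre : pre = ds := by
            have h1 : (pre ++ c :: rest).take pre.length = pre := by simp
            rw [heq, hlen, List.take_append] at h1
            simpa using h1.symm
          subst hpre
          have h2 : c :: rest = '/' :: t := List.append_cancel_left heq
          have hc : c = '/' := (List.cons_eq_cons.mp h2).1
          apply hhit
          simp [hc]
          exact hds

-- A's per-directory test, read as a statement about normalized.toList
theorem a_dir_test_iff (normalized d : String) :
    (normalized == d || PySem.Str.startswith normalized (d ++ "/")) = true ↔
      (normalized.toList = d.toList ∨ d.toList ++ ['/'] <+: normalized.toList) := by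
  simp [Bool.or_eq_true, beq_iff_eq, ← String.toList_inj, PySem.Chars.startswith_iff]

-- the third branch of A equals the third branch of B
theorem third_branch_eq (normalized : String) (ds : List String) :
    (ds.any (fun directory => normalized == directory || PySem.Str.startswith normalized (directory ++ "/")))
      = (if docPrefixScan (PySem.Set.ofList (ds.map String.toList)) [] normalized.toList then true
         else PySem.Set.contains (PySem.Set.ofList (ds.map String.toList)) normalized.toList) := by
  apply Bool.eq_iff_iff.mpr
  constructor
  · intro h
    obtain ⟨d, hd, hdt⟩ := List.any_eq_true.mp h
    rcases (a_dir_test_iff normalized d).mp hdt with heq | hpre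
    · have hmem : normalized.toList ∈ PySem.Set.ofList (ds.map String.toList) := by
        rw [PySem.Set.mem_ofList, heq]
        exact List.mem_map_of_mem hd
      split
      · rfl
      · exact (PySem.Set.contains_iff _ _).mpr hmem
    · obtain ⟨t, ht⟩ := hpre
      have hscan : docPrefixScan (PySem.Set.ofList (ds.map String.toList)) [] normalized.toList = true := by
        rw [docPrefixScan_eq_true_iff]
        refine ⟨d.toList, ?_, t, ?_, ?_⟩
        · rw [PySem.Set.mem_ofList]; exact List.mem_map_of_mem hd
        · simpa using ht.symm
        · simp
      simp [hscan]
  · intro h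
    by_cases hscan : docPrefixScan (PySem.Set.ofList (ds.map String.toList)) [] normalized.toList = true
    · obtain ⟨e, he, t, ht, -⟩ := (docPrefixScan_eq_true_iff _ _ []).mp hscan
      rw [PySem.Set.mem_ofList] at he
      obtain ⟨d, hd, rfl⟩ := List.mem_map.mp he
      refine List.any_eq_true.mpr ⟨d, hd, (a_dir_test_iff _ _).mpr (Or.inr ⟨t, ?_⟩)⟩
      simpa using ht.symm
    · rw [if_neg hscan] at h
      have hmem := (PySem.Set.contains_iff _ _).mp h
      rw [PySem.Set.mem_ofList] at hmem
      obtain ⟨d, hd, hdt⟩ := List.mem_map.mp hmem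
      exact List.any_eq_true.mpr ⟨d, hd, (a_dir_test_iff _ _).mpr (Or.inl hdt.symm)⟩

-- ===== VERDICT (by name: the statement is the Claim_ definition above) =====
theorem is_documentation_path_spec : Claim_equal_is_documentation_path := by
  intro path_value docs_config _
  unfold Spec_is_documentation_path is_documentation_path is_documentation_path_alt
  by_cases h1 : (normalize_path path_value == "") = true
  · simp only [if_pos h1]
  · by_cases h2 : (PySem.Str.endswith (normalize_path path_value) "/readme.md" || normalize_path path_value == "readme.md") = true
    · simp only [if_neg h1, if_pos h2]
    · simp only [if_neg h1, if_neg h2]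
      exact third_branch_eq _ _
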